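-- pv_equiv track=rewrite | github.com/rycus86/aoc2021 | 2021/19/second.py | scanner_distances
-- ===== SOURCE A (Python) =====
-- def scanner_distances(sc1, sc2):
--     rc2 = {y: x for x, y in sc2.items()}
--
--     mapping = dict()
--
--     for pos, dist in sc1.items():
--         if dist in rc2:
--
--             pa1, pa2 = pos
--             pb1, pb2 = rc2[dist]
--
--             if pa1 not in mapping:
--                 mapping[pa1] = {pb1, pb2}
--             elif isinstance(mapping[pa1], set):
--                 if pb1 in mapping[pa1]:
--                     mapping[pa1] = pb1
--                 else:
--                     mapping[pa1] = pb2
--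
--             if pa2 not in mapping:
--                 mapping[pa2] = {pb1, pb2}
--             elif isinstance(mapping[pa2], set):
--                 if pb1 in mapping[pa2]:
--                     mapping[pa2] = pb1
--                 else:
--                     mapping[pa2] = pb2
--
--     # drop unresolved ones
--     mapping = {x: y for x, y in mapping.items() if isinstance(y, int)}
--
--     return mapping
-- ===== SOURCE B (Python) =====
-- def scanner_distances(sc1, sc2):
--     rc2 = {y: x for x, y in sc2.items()}
--
--     # group candidate pairs by axis, in first-seen order
--     index = {}
--     for (pa1, pa2), dist in sc1.items():
--         if dist in rc2:
--             pair = rc2[dist]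
--             index.setdefault(pa1, []).append(pair)
--             index.setdefault(pa2, []).append(pair)
--
--     # an axis resolves once it has two candidate pairs: keep the second
--     # pair's first component if the first pair contains it, else the second
--     result = {}
--     for axis, pairs in index.items():
--         if len(pairs) >= 2:
--             b1, b2 = pairs[1]
--             result[axis] = b1 if b1 in set(pairs[0]) else b2
--     return result
-- ===== Notes on version B (the rewrite author's own statement) =====
-- stated objective: alternative
-- what changed: B replaces A's incremental set-or-int mutation of the mapping by two passes: first group all candidate (pb1,pb2) pairs per axis in a dict of lists, then resolve each axis with at least two pairs from its first two pairs only.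
import Mathlib
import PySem

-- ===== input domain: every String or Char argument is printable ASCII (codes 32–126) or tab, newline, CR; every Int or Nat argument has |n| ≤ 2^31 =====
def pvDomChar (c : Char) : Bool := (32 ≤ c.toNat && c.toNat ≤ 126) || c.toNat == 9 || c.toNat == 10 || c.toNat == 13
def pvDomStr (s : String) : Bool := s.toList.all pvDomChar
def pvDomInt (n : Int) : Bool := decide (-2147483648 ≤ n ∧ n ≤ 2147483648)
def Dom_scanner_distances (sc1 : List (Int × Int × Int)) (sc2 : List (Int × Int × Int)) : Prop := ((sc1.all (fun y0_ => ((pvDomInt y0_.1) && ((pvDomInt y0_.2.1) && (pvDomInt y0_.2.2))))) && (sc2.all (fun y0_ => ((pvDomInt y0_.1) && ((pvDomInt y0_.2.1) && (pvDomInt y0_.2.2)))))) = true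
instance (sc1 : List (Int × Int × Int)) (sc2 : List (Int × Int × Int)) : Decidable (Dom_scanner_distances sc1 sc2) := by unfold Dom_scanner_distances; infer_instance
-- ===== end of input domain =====

-- B resolves each axis from its first two grouped candidate pairs instead of A's
-- incremental set-or-int mutation; same cost, different decomposition (objective: alternative).

-- ===== PORT A =====
-- A's mapping values are either a set of ints (unresolved) or an int (resolved):
-- Sum.inl = set (PySem.Set Int), Sum.inr = int.
-- rc2 = {y: x for x, y in sc2.items()} — identical line in Source A and Source B, shared helper
def pvRev (sc2 : List (Int × Int × Int)) : PySem.Dict Int (Int × Int) :=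
  sc2.foldl (fun d x => d.insert x.2.2 (x.1, x.2.1)) PySem.Dict.empty

def aStep (m : PySem.Dict Int (Sum (List Int) Int)) (pa pb1 pb2 : Int) :
    PySem.Dict Int (Sum (List Int) Int) :=
  match m.get? pa with
  | none => m.insert pa (Sum.inl (PySem.Set.add (PySem.Set.add PySem.Set.empty pb1) pb2))
  | some (Sum.inl s) =>
      if PySem.Set.contains s pb1 then m.insert pa (Sum.inr pb1) else m.insert pa (Sum.inr pb2)
  | some (Sum.inr _) => m

def aLoop (rc2 : PySem.Dict Int (Int × Int)) (m : PySem.Dict Int (Sum (List Int) Int))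
    (e : Int × Int × Int) : PySem.Dict Int (Sum (List Int) Int) :=
  match rc2.get? e.2.2 with
  | none => m
  | some pr => aStep (aStep m e.1 pr.1 pr.2) e.2.1 pr.1 pr.2

def scanner_distances (sc1 : List (Int × Int × Int)) (sc2 : List (Int × Int × Int)) :
    List (Int × Int) :=
  -- final comprehension: keep only the int-valued entries
  ((sc1.foldl (aLoop (pvRev sc2)) PySem.Dict.empty).items).foldl
    (fun out kv => match kv.2 with
      | Sum.inr n => out ++ [(kv.1, n)]
      | Sum.inl _ => out) []

-- ===== PORT B =====
def bAppend (idx : PySem.Dict Int (List (Int × Int))) (pa : Int) (pr : Int × Int) :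
    PySem.Dict Int (List (Int × Int)) :=
  match idx.get? pa with
  | none => idx.insert pa [pr]
  | some l => idx.insert pa (l ++ [pr])

def bLoop (rc2 : PySem.Dict Int (Int × Int)) (idx : PySem.Dict Int (List (Int × Int)))
    (e : Int × Int × Int) : PySem.Dict Int (List (Int × Int)) :=
  match rc2.get? e.2.2 with
  | none => idx
  | some pr => bAppend (bAppend idx e.1 pr) e.2.1 pr

def bResolve (p0 p1 : Int × Int) : Int :=
  if PySem.Set.contains (PySem.Set.add (PySem.Set.add PySem.Set.empty p0.1) p0.2) p1.1
  then p1.1 else p1.2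

def scanner_distances_alt (sc1 : List (Int × Int × Int)) (sc2 : List (Int × Int × Int)) :
    List (Int × Int) :=
  ((sc1.foldl (bLoop (pvRev sc2)) PySem.Dict.empty).items).foldl
    (fun out kv => match kv.2 with
      | p0 :: p1 :: _ => out ++ [(kv.1, bResolve p0 p1)]
      | _ => out) []

-- ===== PRECONDITION & SPEC =====
def Spec_scanner_distances (sc1 : List (Int × Int × Int)) (sc2 : List (Int × Int × Int)) (out : List (Int × Int)) : Prop := out = scanner_distances_alt sc1 sc2
instance (sc1 : List (Int × Int × Int)) (sc2 : List (Int × Int × Int)) (out : List (Int × Int)) : Decidable (Spec_scanner_distances sc1 sc2 out) := by unfold Spec_scanner_distances; infer_instance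

-- ===== CLAIM (what is proved, stated in full; the proofs are below) =====
def Claim_equal_scanner_distances : Prop := ∀ (sc1 : List (Int × Int × Int)) (sc2 : List (Int × Int × Int)), Dom_scanner_distances sc1 sc2 → Spec_scanner_distances sc1 sc2 (scanner_distances sc1 sc2)

-- ===== LEMMAS AND PROOFS =====

-- the A-side value an axis holds, as a function of its B-side candidate-pair list
def pvVal : List (Int × Int) → Sum (List Int) Int
  | [] => Sum.inl []
  | [p] => Sum.inl (PySem.Set.add (PySem.Set.add PySem.Set.empty p.1) p.2)
  | p0 :: p1 :: _ => Sum.inr (bResolve p0 p1)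

def pvMap (idx : PySem.Dict Int (List (Int × Int))) : PySem.Dict Int (Sum (List Int) Int) :=
  PySem.Dict.mk (idx.items.map (fun kv => (kv.1, pvVal kv.2)))

def pvInv (idx : PySem.Dict Int (List (Int × Int))) : Prop :=
  idx.keys.Nodup ∧ ∀ kv ∈ idx.items, kv.2 ≠ []

lemma get?_pvMap (idx : PySem.Dict Int (List (Int × Int))) (k : Int) :
    (pvMap idx).get? k = (idx.get? k).map pvVal := by
  obtain ⟨l⟩ := idx
  induction l with
  | nil => rfl
  | cons hd t ih =>
      have e1 : pvMap ⟨hd :: t⟩ =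
          PySem.Dict.mk ((hd.1, pvVal hd.2) :: t.map (fun kv => (kv.1, pvVal kv.2))) := rfl
      rw [e1, PySem.Dict.get?_mk_cons, PySem.Dict.get?_mk_cons]
      by_cases hk : hd.1 == k
      · simp [hk]
      · simp only [hk, Bool.false_eq_true, if_false]
        simpa [pvMap] using ih

lemma contains_pvMap (idx : PySem.Dict Int (List (Int × Int))) (k : Int) :
    (pvMap idx).contains k = idx.contains k := by
  rw [PySem.Dict.contains_eq_isSome_get?, PySem.Dict.contains_eq_isSome_get?, get?_pvMap]
  cases idx.get? k <;> rfl

lemma insert_pvMap (idx : PySem.Dict Int (List (Int × Int))) (k : Int) (v : List (Int × Int)) :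
    pvMap (idx.insert k v) = (pvMap idx).insert k (pvVal v) := by
  apply PySem.Dict.ext
  have hc := contains_pvMap idx k
  have e0 : (pvMap idx).items = idx.items.map (fun kv => (kv.1, pvVal kv.2)) := rfl
  rw [show (pvMap (idx.insert k v)).items = (idx.insert k v).items.map
        (fun kv => (kv.1, pvVal kv.2)) from rfl,
      PySem.Dict.items_insert, PySem.Dict.items_insert, hc, e0]
  split
  · simp only [List.map_map]
    apply List.map_congr_left
    intro p _
    by_cases h : p.1 == k <;> simp [h, Function.comp]
  · simp

lemma mem_items_unique {ν : Type} : ∀ (l : List (Int × ν)), (l.map (·.1)).Nodup →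
    ∀ {k : Int} {v w : ν}, (k, v) ∈ l → (k, w) ∈ l → v = w := by
  intro l
  induction l with
  | nil => intro _ k v w h1 _; exact absurd h1 (by simp)
  | cons p t ih =>
      intro h k v w h1 h2
      rw [List.map_cons, List.nodup_cons] at h
      rcases List.mem_cons.1 h1 with h1 | h1 <;> rcases List.mem_cons.1 h2 with h2 | h2
      · rw [← h1] at h2; exact (Prod.ext_iff.1 h2).2.symm
      · rw [← h1] at h; exact absurd (List.mem_map_of_mem (f := (·.1)) h2) h.1
      · rw [← h2] at h; exact absurd (List.mem_map_of_mem (f := (·.1)) h1) h.1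
      · exact ih h.2 h1 h2

lemma insert_same (d : PySem.Dict Int (Sum (List Int) Int)) (k : Int) (v : Sum (List Int) Int)
    (hnd : d.keys.Nodup) (h : d.get? k = some v) : d.insert k v = d := by
  have hcont : d.contains k = true := by
    rw [PySem.Dict.contains_eq_isSome_get?, h]; rfl
  apply PySem.Dict.ext
  rw [PySem.Dict.items_insert, if_pos hcont]
  have hmem : (k, v) ∈ d.items := PySem.Dict.mem_items_of_get?_eq_some _ h
  conv_rhs => rw [← List.map_id d.items]
  apply List.map_congr_left
  intro p hp
  by_cases hk : p.1 == k
  · have hpk : p.1 = k := by simpa using hk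
    have : p = (k, v) := by
      obtain ⟨p1, p2⟩ := p
      simp only at hpk; subst hpk
      have hnd' : (d.items.map (·.1)).Nodup := by
        simpa [PySem.Dict.keys] using hnd
      exact congrArg _ (mem_items_unique d.items hnd' hp hmem)
    simp [this]
  · simp [hk]

lemma keys_pvMap (idx : PySem.Dict Int (List (Int × Int))) :
    (pvMap idx).keys = idx.keys := by
  simp [pvMap, PySem.Dict.keys]

lemma step_comm (idx : PySem.Dict Int (List (Int × Int))) (pa : Int) (pr : Int × Int)
    (hinv : pvInv idx) :
    aStep (pvMap idx) pa pr.1 pr.2 = pvMap (bAppend idx pa pr) := by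
  obtain ⟨hnd, hne⟩ := hinv
  unfold aStep bAppend
  rw [get?_pvMap]
  cases h : idx.get? pa with
  | none => simp [insert_pvMap, pvVal]
  | some l =>
      have hl : l ≠ [] := hne (pa, l) (PySem.Dict.mem_items_of_get?_eq_some _ h)
      match l, hl with
      | [p0], _ =>
          simp [insert_pvMap, pvVal, bResolve]
          split <;> rfl
      | p0 :: p1 :: rest, _ =>
          simp only [Option.map_some, insert_pvMap]
          rw [show pvVal ((p0 :: p1 :: rest) ++ [pr]) = Sum.inr (bResolve p0 p1) from rfl,
              show pvVal (p0 :: p1 :: rest) = Sum.inr (bResolve p0 p1) from rfl]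
          exact (insert_same (pvMap idx) pa _ (by rw [keys_pvMap]; exact hnd)
            (by rw [get?_pvMap, h]; rfl)).symm

lemma bAppend_inv (idx : PySem.Dict Int (List (Int × Int))) (pa : Int) (pr : Int × Int)
    (hinv : pvInv idx) : pvInv (bAppend idx pa pr) := by
  obtain ⟨hnd, hne⟩ := hinv
  unfold bAppend
  have key : ∀ v : List (Int × Int), v ≠ [] → pvInv (idx.insert pa v) := by
    intro v hv
    refine ⟨PySem.Dict.nodup_keys_insert _ _ _ hnd, ?_⟩
    intro kv hkv
    rcases (PySem.Dict.mem_items_insert _ _ _ _).1 hkv with h | h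
    · rw [h]; exact hv
    · exact hne kv h.1
  cases idx.get? pa with
  | none => exact key [pr] (by simp)
  | some l => exact key (l ++ [pr]) (by simp)

lemma loop_comm (rc2 : PySem.Dict Int (Int × Int)) (l : List (Int × Int × Int)) :
    ∀ idx : PySem.Dict Int (List (Int × Int)), pvInv idx →
      l.foldl (aLoop rc2) (pvMap idx) = pvMap (l.foldl (bLoop rc2) idx) ∧
      pvInv (l.foldl (bLoop rc2) idx) := by
  induction l with
  | nil => intro idx h; exact ⟨rfl, h⟩
  | cons e t ih =>
      intro idx h
      simp only [List.foldl_cons]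
      have hstep : aLoop rc2 (pvMap idx) e = pvMap (bLoop rc2 idx e) ∧ pvInv (bLoop rc2 idx e) := by
        unfold aLoop bLoop
        cases rc2.get? e.2.2 with
        | none => exact ⟨rfl, h⟩
        | some pr =>
            have h1 := bAppend_inv idx e.1 pr h
            refine ⟨?_, bAppend_inv _ e.2.1 pr h1⟩
            show aStep (aStep (pvMap idx) e.1 pr.1 pr.2) e.2.1 pr.1 pr.2 =
              pvMap (bAppend (bAppend idx e.1 pr) e.2.1 pr)
            rw [step_comm idx e.1 pr h, step_comm _ e.2.1 pr h1]
      rw [hstep.1]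
      exact ih _ hstep.2

lemma extract_comm (items : List (Int × List (Int × Int))) :
    ∀ acc : List (Int × Int), (∀ kv ∈ items, kv.2 ≠ []) →
      (items.map (fun kv => (kv.1, pvVal kv.2))).foldl
        (fun out kv => match kv.2 with
          | Sum.inr n => out ++ [(kv.1, n)]
          | Sum.inl _ => out) acc
      = items.foldl
        (fun out kv => match kv.2 with
          | p0 :: p1 :: _ => out ++ [(kv.1, bResolve p0 p1)]
          | _ => out) acc := by
  induction items with
  | nil => intro acc _; rfl
  | cons kv t ih =>
      intro acc hne
      simp only [List.map_cons, List.foldl_cons]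
      have hkv : kv.2 ≠ [] := hne kv (by simp)
      have ht : ∀ kv ∈ t, kv.2 ≠ [] := fun x hx => hne x (by simp [hx])
      match h : kv.2, hkv with
      | [p], _ => exact ih acc ht
      | p0 :: p1 :: rest, _ => exact ih _ ht

-- ===== VERDICT (by name: the statement is the Claim_ definition above) =====
theorem scanner_distances_spec : Claim_equal_scanner_distances := by
  intro sc1 sc2 _
  unfold Spec_scanner_distances scanner_distances scanner_distances_alt
  have h0 : pvInv PySem.Dict.empty := ⟨List.nodup_nil, by intro kv h; cases h⟩
  obtain ⟨hloop, hinv⟩ := loop_comm (pvRev sc2) sc1 PySem.Dict.empty h0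
  rw [show (PySem.Dict.empty : PySem.Dict Int (Sum (List Int) Int)) = pvMap PySem.Dict.empty
      from rfl, hloop]
  exact extract_comm _ [] hinv.2
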